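-- pv_equiv track=rewrite | github.com/wazart0/PMt | backend/connectors/workspace/xlsx_to_jira.py | check_if_successor
-- ===== SOURCE A (Python) =====
-- def check_if_successor(wbs, successor):
--     wbs_split = wbs.split('.')
--     successor_split = successor.split('.')
--     if len(wbs_split) >= len(successor_split):
--         return False
--     for i in range(len(wbs_split)):
--         if wbs_split[i] != successor_split[i]:
--             return False
--     return True
-- ===== SOURCE B (Python) =====
-- def check_if_successor(wbs, successor):
--     return successor.startswith(wbs + '.')
-- ===== Notes on version B (the rewrite author's own statement) =====
-- stated objective: idiomatic
-- what changed: Replaces splitting both strings into dot-separated component lists and comparing them element by element with a single string prefix test successor.startswith(wbs + '.'), which is equivalent because a strict component-prefix holds exactly when successor begins with wbs followed by a dot.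
import Mathlib
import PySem

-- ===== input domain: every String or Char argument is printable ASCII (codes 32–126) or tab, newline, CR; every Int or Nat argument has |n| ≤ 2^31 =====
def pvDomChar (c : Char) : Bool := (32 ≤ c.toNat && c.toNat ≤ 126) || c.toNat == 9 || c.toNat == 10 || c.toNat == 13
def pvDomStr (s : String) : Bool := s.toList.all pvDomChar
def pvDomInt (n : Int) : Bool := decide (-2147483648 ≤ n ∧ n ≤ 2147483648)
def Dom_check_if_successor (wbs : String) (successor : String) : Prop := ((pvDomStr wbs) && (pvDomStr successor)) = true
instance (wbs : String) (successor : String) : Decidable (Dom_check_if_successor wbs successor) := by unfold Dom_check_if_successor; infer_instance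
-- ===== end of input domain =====

-- B replaces the two splits and the component-comparison loop of A by a single
-- prefix test successor.startswith(wbs + '.'); return value only, no side effects.

-- ===== PORT A =====
-- the 'for i in range(...): if wbs_split[i] != successor_split[i]: return False' loop
def pvLoopA (ws ss : List (List Char)) : List Int → Bool
  | [] => true
  | i :: rest =>
    if PySem.List.pyGet? ws i ≠ PySem.List.pyGet? ss i then false
    else pvLoopA ws ss rest

def check_if_successor (wbs : String) (successor : String) : Bool :=
  let wbs_split := PySem.Chars.splitOn wbs.toList ['.']
  let successor_split := PySem.Chars.splitOn successor.toList ['.']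
  if wbs_split.length ≥ successor_split.length then false
  else pvLoopA wbs_split successor_split (PySem.List.pyRange 0 wbs_split.length 1)

-- ===== PORT B =====
def check_if_successor_alt (wbs : String) (successor : String) : Bool :=
  PySem.Chars.startswith successor.toList (wbs.toList ++ ['.'])

-- ===== PRECONDITION & SPEC =====
def Spec_check_if_successor (wbs : String) (successor : String) (out : Bool) : Prop := out = check_if_successor_alt wbs successor
instance (wbs : String) (successor : String) (out : Bool) : Decidable (Spec_check_if_successor wbs successor out) := by unfold Spec_check_if_successor; infer_instance

-- ===== CLAIM (what is proved, stated in full; the proofs are below) =====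
def Claim_equal_check_if_successor : Prop := ∀ (wbs : String) (successor : String), Dom_check_if_successor wbs successor → Spec_check_if_successor wbs successor (check_if_successor wbs successor)

-- ===== LEMMAS AND PROOFS =====

-- PySem's fuel-based splitOn with a one-char separator is Mathlib's splitOnP
theorem pv_go_spec (fuel : Nat) (l cur : List Char) (acc : List (List Char))
    (h : l.length < fuel) :
    PySem.Chars.splitOn.go ['.'] fuel l cur acc
      = acc.reverse ++ List.modifyHead (fun h => cur.reverse ++ h)
          (List.splitOnP (· == '.') l) := by
  induction fuel generalizing l cur acc with
  | zero => omega
  | succ fuel ih =>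
    cases l with
    | nil =>
      simp [PySem.Chars.splitOn.go, List.splitOnP_nil]
    | cons c rest =>
      rw [PySem.Chars.splitOn.go]
      by_cases hc : c = '.'
      · subst hc
        rw [if_pos (by simp [List.isPrefixOf])]
        rw [show List.drop (['.'] : List Char).length ('.' :: rest) = rest from rfl]
        rw [ih rest [] (cur.reverse :: acc) (by simp at h; omega)]
        rw [List.splitOnP_cons, if_pos (by simp)]
        rcases hsp : List.splitOnP (fun x => x == '.') rest with _ | ⟨hd, tl⟩
        · exact absurd hsp (List.splitOnP_ne_nil _ _)
        · simp
      · rw [if_neg (by simp [List.isPrefixOf]; exact fun hh => hc hh.symm)]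
        rw [ih rest (c :: cur) acc (by simp at h; omega)]
        rw [List.splitOnP_cons, if_neg (by simp [hc])]
        rcases hsp : List.splitOnP (fun x => x == '.') rest with _ | ⟨hd, tl⟩
        · exact absurd hsp (List.splitOnP_ne_nil _ _)
        · simp

theorem pv_splitOn_eq (cs : List Char) :
    PySem.Chars.splitOn cs ['.'] = List.splitOnP (· == '.') cs := by
  rw [PySem.Chars.splitOn, pv_go_spec _ cs [] [] (by omega)]
  rcases hsp : List.splitOnP (fun x => x == '.') cs with _ | ⟨hd, tl⟩
  · exact absurd hsp (List.splitOnP_ne_nil _ _)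
  · simp

theorem pv_loop_iff (ws ss : List (List Char)) (idxs : List Int) :
    pvLoopA ws ss idxs = true
      ↔ ∀ i ∈ idxs, PySem.List.pyGet? ws i = PySem.List.pyGet? ss i := by
  induction idxs with
  | nil => simp [pvLoopA]
  | cons i rest ih =>
    rw [pvLoopA]
    by_cases hi : PySem.List.pyGet? ws i = PySem.List.pyGet? ss i
    · simp [hi, ih]
    · simp [hi]

theorem pv_pyRange_nat (n : Nat) :
    PySem.List.pyRange 0 (n : Int) 1 = (List.range n).map Int.ofNat := by
  rcases Nat.eq_zero_or_pos n with h | h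
  · subst h; simp [PySem.List.pyRange]
  · simp only [PySem.List.pyRange, if_neg (by norm_num : (1 : Int) ≠ 0)]
    rw [if_pos (by norm_num), if_pos (by exact_mod_cast h)]
    norm_num

-- A's guarded index loop decides list-prefix once the length test has passed
theorem pv_loop_range (ws ss : List (List Char)) (hlen : ws.length < ss.length) :
    pvLoopA ws ss (PySem.List.pyRange 0 ws.length 1) = true ↔ ws <+: ss := by
  rw [pv_loop_iff, pv_pyRange_nat]
  constructor
  · intro h
    rw [List.prefix_iff_eq_take]
    apply List.ext_getElem (by simp [List.length_take]; omega)
    intro i hi hi2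
    have hmem : (Int.ofNat i) ∈ List.map Int.ofNat (List.range ws.length) :=
      List.mem_map_of_mem (List.mem_range.mpr hi)
    have hpt := h _ hmem
    rw [Int.ofNat_eq_natCast, PySem.List.pyGet?_natCast, PySem.List.pyGet?_natCast,
        List.getElem?_eq_getElem hi, List.getElem?_eq_getElem (by omega : i < ss.length)] at hpt
    simpa [List.getElem_take] using Option.some.inj hpt
  · rintro ⟨extra, hext⟩ i hi
    simp only [List.mem_map, List.mem_range] at hi
    obtain ⟨k, hk, rfl⟩ := hi
    rw [Int.ofNat_eq_natCast, PySem.List.pyGet?_natCast, PySem.List.pyGet?_natCast, ← hext,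
        List.getElem?_append_left hk]

-- intercalating a concatenation of two nonempty lists of parts
theorem pv_intercalate_append (sep : List Char) (xs ys : List (List Char))
    (hx : xs ≠ []) (hy : ys ≠ []) :
    List.intercalate sep (xs ++ ys)
      = List.intercalate sep xs ++ sep ++ List.intercalate sep ys := by
  induction xs with
  | nil => exact absurd rfl hx
  | cons a xs ih =>
    cases xs with
    | nil =>
      rcases ys with _ | ⟨y, ys⟩
      · exact absurd rfl hy
      · simp [List.intercalate, List.intersperse]
    | cons b xs =>
      have := ih (by simp)
      simp only [List.cons_append, List.intercalate, List.intersperse] at this ⊢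
      simp [this]

-- strict component-prefix on the splits ↔ raw-string prefix 'wbs + "."'
theorem pv_main (w s : List Char) :
    ((List.splitOnP (· == '.') w).length < (List.splitOnP (· == '.') s).length
      ∧ List.splitOnP (· == '.') w <+: List.splitOnP (· == '.') s)
    ↔ (w ++ ['.']) <+: s := by
  constructor
  · rintro ⟨hlen, ⟨extra, hext⟩⟩
    have hx : extra ≠ [] := by
      intro hh; subst hh
      rw [List.append_nil] at hext
      rw [hext] at hlen
      exact absurd hlen (lt_irrefl _)
    have hw : List.intercalate ['.'] (List.splitOnP (· == '.') w) = w := by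
      have := List.intercalate_splitOn w '.'
      simpa [List.splitOn] using this
    have hs : List.intercalate ['.'] (List.splitOnP (· == '.') s) = s := by
      have := List.intercalate_splitOn s '.'
      simpa [List.splitOn] using this
    rw [← hext, pv_intercalate_append _ _ _ (List.splitOnP_ne_nil _ _) hx, hw] at hs
    exact ⟨List.intercalate ['.'] extra, by simpa using hs⟩
  · rintro ⟨rest, hrest⟩
    have hse : s = w ++ '.' :: rest := by simpa using hrest.symm
    rw [hse, List.splitOnP_append_cons _ _ _ _ (by simp)]
    constructor
    · have h1 := List.length_pos_of_ne_nil (List.splitOnP_ne_nil (· == '.') rest)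
      simp only [List.length_append]
      omega
    · exact ⟨List.splitOnP (· == '.') rest, rfl⟩

-- ===== VERDICT (by name: the statement is the Claim_ definition above) =====
theorem check_if_successor_spec : Claim_equal_check_if_successor := by
  intro wbs successor _
  unfold Spec_check_if_successor check_if_successor check_if_successor_alt
  simp only [pv_splitOn_eq]
  by_cases hlen : (List.splitOnP (· == '.') wbs.toList).length
      ≥ (List.splitOnP (· == '.') successor.toList).length
  · rw [if_pos hlen]
    rcases h : PySem.Chars.startswith successor.toList (wbs.toList ++ ['.']) with _ | _
    · rfl
    · have h2 := (pv_main wbs.toList successor.toList).mpr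
        ((PySem.Chars.startswith_iff _ _).mp h)
      exact absurd h2.1 (by omega)
  · rw [if_neg hlen]
    have hlt : (List.splitOnP (· == '.') wbs.toList).length
        < (List.splitOnP (· == '.') successor.toList).length := lt_of_not_ge hlen
    have hkey := pv_loop_range _ _ hlt
    have hsw : PySem.Chars.startswith successor.toList (wbs.toList ++ ['.']) = true
        ↔ List.splitOnP (· == '.') wbs.toList <+: List.splitOnP (· == '.') successor.toList := by
      rw [PySem.Chars.startswith_iff]
      exact ⟨fun hh => ((pv_main _ _).mpr hh).2, fun hh => (pv_main _ _).mp ⟨hlt, hh⟩⟩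
    rw [← hsw] at hkey
    exact Bool.eq_iff_iff.mpr hkey
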